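-- pv_equiv track=rewrite | github.com/winsatid62/Jouney-to-Venus | Journey to Venus/MainGame.py | modifyTime
-- ===== SOURCE A (Python) =====
-- months = {
--     "January":31,
--     "Febuary":28,
--     "March":31,
--     "April":30,
--     "May":31,
--     "June":30,
--     "July":31,
--     "August":31,
--     "September":30,
--     "October":31,
--     "November":30,
--     "December":31
-- }
--
-- def modifyTime(sec, Y=0, Mo=0, D=0, H=0, Mi=0, S=0):
--     '''add or subtract time in seconds in year, month, etc.'''
--     totalDays = 0
--     dayInTheMonth = 0
--     for month, days in months.items():
--         totalDays += days
--         if (sec%(365*60*60*24))//(60*60*24) < totalDays: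
--             dayInTheMonth = days
--             break
--     sec += ((Y*(365*60*60*24)) + (Mo*dayInTheMonth*24*60*60) + (D*24*60*60) + (H*60*60) + (Mi*60) + S)
--     return sec
-- ===== SOURCE B (Python) =====
-- # Prefix-sum table + binary search instead of a linear scan over a dict.
-- MONTH_LENGTHS = [31, 28, 31, 30, 31, 30, 31, 31, 30, 31, 30, 31]
--
-- _CUM = []
-- _t = 0
-- for _m in MONTH_LENGTHS:
--     _t += _m
--     _CUM.append(_t)
--
-- def modifyTime(sec, Y=0, Mo=0, D=0, H=0, Mi=0, S=0):
--     '''add or subtract time in seconds in year, month, etc.'''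
--     d = (sec % (365 * 86400)) // 86400
--     # binary search: first index with _CUM[idx] > d  (bisect_right)
--     lo, hi = 0, 12
--     while lo < hi:
--         mid = (lo + hi) // 2
--         if d < _CUM[mid]:
--             hi = mid
--         else:
--             lo = mid + 1
--     dayInTheMonth = MONTH_LENGTHS[lo]
--     return sec + Y * 365 * 86400 + Mo * dayInTheMonth * 86400 + D * 86400 + H * 3600 + Mi * 60 + S
-- ===== Notes on version B (the rewrite author's own statement) =====
-- stated objective: alternative
-- what changed: Replaces A's linear scan over the month dict (accumulating totals until the day-of-year falls inside a month) with a precomputed prefix-sum table and a hand-written bisect_right binary search that locates the containing month.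
import Mathlib
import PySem

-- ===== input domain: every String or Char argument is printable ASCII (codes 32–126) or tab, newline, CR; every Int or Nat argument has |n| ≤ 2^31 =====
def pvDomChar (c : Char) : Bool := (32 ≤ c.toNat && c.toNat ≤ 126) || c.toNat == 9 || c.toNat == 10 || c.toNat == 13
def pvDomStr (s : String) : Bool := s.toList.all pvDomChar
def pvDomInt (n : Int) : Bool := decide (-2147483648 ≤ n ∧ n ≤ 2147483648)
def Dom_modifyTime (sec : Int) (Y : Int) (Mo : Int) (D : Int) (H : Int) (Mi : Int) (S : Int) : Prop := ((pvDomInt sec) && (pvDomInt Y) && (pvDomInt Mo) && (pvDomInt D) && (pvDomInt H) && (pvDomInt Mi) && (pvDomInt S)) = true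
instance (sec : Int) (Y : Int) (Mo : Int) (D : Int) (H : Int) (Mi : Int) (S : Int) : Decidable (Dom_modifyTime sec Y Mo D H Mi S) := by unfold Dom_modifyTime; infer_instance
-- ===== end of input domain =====

-- B replaces A's linear scan over the month dict by a prefix-sum table plus a
-- binary search for the containing month (alternative decomposition, same cost on 12 fixed entries).

-- ===== PORT A =====
-- the module-level dict `months` (insertion order)
def monthsA : List (String × Int) :=
  [("January", 31), ("Febuary", 28), ("March", 31), ("April", 30), ("May", 31),
   ("June", 30), ("July", 31), ("August", 31), ("September", 30), ("October", 31),
   ("November", 30), ("December", 31)]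

-- the for-loop with break: state = (totalDays, dayInTheMonth); the day expression is
-- recomputed from sec each iteration, exactly as in the Python source
def loopA (sec : Int) : List (String × Int) → Int → Int → Int
  | [], _, day => day
  | (_, days) :: rest, totalDays, day =>
    let totalDays' := totalDays + days
    if PySem.Int.floordiv (PySem.Int.mod sec (365 * 60 * 60 * 24)) (60 * 60 * 24) < totalDays' then
      days
    else
      loopA sec rest totalDays' day

def modifyTime (sec : Int) (Y : Int) (Mo : Int) (D : Int) (H : Int) (Mi : Int) (S : Int) : Int :=
  let dayInTheMonth := loopA sec monthsA 0 0
  sec + ((Y * (365 * 60 * 60 * 24)) + (Mo * dayInTheMonth * 24 * 60 * 60) + (D * (24 * 60 * 60))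
         + (H * (60 * 60)) + (Mi * 60) + S)

-- ===== PORT B =====
def monthLengthsB : List Int := [31, 28, 31, 30, 31, 30, 31, 31, 30, 31, 30, 31]

-- Source B's module-level prefix-sum loop
def buildCum : List Int → Int → List Int
  | [], _ => []
  | m :: rest, t => (t + m) :: buildCum rest (t + m)

def cumB : List Int := buildCum monthLengthsB 0

-- Source B's while-loop binary search (bisect_right): first index with cumB[idx] > d.
-- Ported as the obvious structural recursion with fuel (hi - lo).toNat, which always suffices;
-- cumB[mid] via pyGet?/getD 0: mid is always in range (0 ≤ lo ≤ mid < hi ≤ 12), so the default is never used.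
def bsearchAux (d : Int) : Nat → Int → Int → Int
  | 0, lo, _ => lo
  | fuel + 1, lo, hi =>
    if lo < hi then
      let mid := PySem.Int.floordiv (lo + hi) 2
      if d < (PySem.List.pyGet? cumB mid).getD 0 then
        bsearchAux d fuel lo mid
      else
        bsearchAux d fuel (mid + 1) hi
    else lo

def bsearchB (d : Int) (lo hi : Int) : Int := bsearchAux d (hi - lo).toNat lo hi

def modifyTime_alt (sec : Int) (Y : Int) (Mo : Int) (D : Int) (H : Int) (Mi : Int) (S : Int) : Int :=
  let d := PySem.Int.floordiv (PySem.Int.mod sec (365 * 86400)) 86400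
  let lo := bsearchB d 0 12
  let dayInTheMonth := (PySem.List.pyGet? monthLengthsB lo).getD 0
  sec + Y * 365 * 86400 + Mo * dayInTheMonth * 86400 + D * 86400 + H * 3600 + Mi * 60 + S

-- ===== PRECONDITION & SPEC =====
def Spec_modifyTime (sec : Int) (Y : Int) (Mo : Int) (D : Int) (H : Int) (Mi : Int) (S : Int) (out : Int) : Prop := out = modifyTime_alt sec Y Mo D H Mi S
instance (sec : Int) (Y : Int) (Mo : Int) (D : Int) (H : Int) (Mi : Int) (S : Int) (out : Int) : Decidable (Spec_modifyTime sec Y Mo D H Mi S out) := by unfold Spec_modifyTime; infer_instance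

-- ===== CLAIM (what is proved, stated in full; the proofs are below) =====
def Claim_equal_modifyTime : Prop := ∀ (sec : Int) (Y : Int) (Mo : Int) (D : Int) (H : Int) (Mi : Int) (S : Int), Dom_modifyTime sec Y Mo D H Mi S → Spec_modifyTime sec Y Mo D H Mi S (modifyTime sec Y Mo D H Mi S)

-- ===== LEMMAS AND PROOFS =====

-- A's loop with the (loop-invariant) day expression abstracted to a parameter d
def loopAd (d : Int) : List (String × Int) → Int → Int → Int
  | [], _, day => day
  | (_, days) :: rest, totalDays, day =>
    let totalDays' := totalDays + days
    if d < totalDays' then days else loopAd d rest totalDays' day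

theorem loopA_eq_loopAd (sec : Int) (l : List (String × Int)) (t day : Int) :
    loopA sec l t day
      = loopAd (PySem.Int.floordiv (PySem.Int.mod sec (365 * 60 * 60 * 24)) (60 * 60 * 24)) l t day := by
  induction l generalizing t with
  | nil => rfl
  | cons p rest ih => cases p with | mk name days => simp [loopA, loopAd, ih]

set_option maxRecDepth 8192 in
theorem day_eq_of_fin : ∀ n : Fin 365,
    loopAd (n : Int) monthsA 0 0
      = (PySem.List.pyGet? monthLengthsB (bsearchB (n : Int) 0 12)).getD 0 := by decide

theorem day_eq (d : Int) (h0 : 0 ≤ d) (h1 : d < 365) :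
    loopAd d monthsA 0 0 = (PySem.List.pyGet? monthLengthsB (bsearchB d 0 12)).getD 0 := by
  have hd : d = ((d.toNat : Nat) : Int) := by omega
  rw [hd]
  exact day_eq_of_fin ⟨d.toNat, by omega⟩

-- ===== VERDICT (by name: the statement is the Claim_ definition above) =====
theorem modifyTime_spec : Claim_equal_modifyTime := by
  intro sec Y Mo D H Mi S _
  unfold Spec_modifyTime modifyTime modifyTime_alt
  have hm0 : (0:Int) < 365 * 60 * 60 * 24 := by norm_num
  have hmn := PySem.Int.mod_nonneg (a := sec) (b := 365 * 60 * 60 * 24) hm0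
  have hml := PySem.Int.mod_lt (a := sec) (b := 365 * 60 * 60 * 24) hm0
  set m := PySem.Int.mod sec (365 * 60 * 60 * 24) with hm
  have hsame : PySem.Int.mod sec (365 * 86400) = m := by norm_num [hm]
  have hd0 : (0:Int) ≤ PySem.Int.floordiv m (60 * 60 * 24) ∧
      PySem.Int.floordiv m (60 * 60 * 24) < 365 := by
    rw [PySem.Int.floordiv_eq_ediv_of_pos (by norm_num)]
    omega
  have hdsame : PySem.Int.floordiv (PySem.Int.mod sec (365 * 86400)) 86400
      = PySem.Int.floordiv m (60 * 60 * 24) := by rw [hsame]; norm_num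
  rw [loopA_eq_loopAd, ← hm, hdsame, day_eq _ hd0.1 hd0.2]
  ring
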